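-- pv_equiv track=rewrite | github.com/SSAFY-Busan/SSAFY_Algorithm | 211108/dohun/모의고사.py | solution
-- ===== SOURCE A (Python) =====
-- def solution(answers):
--     # 3명의 수포자의 패턴
--     first_lst = [1,2,3,4,5]
--     second_lst = [2,1,2,3,2,4,2,5]
--     third_lst = [3,3,1,1,2,2,4,4,5,5]
--     answer = [] # 정답 리스트
--
--     # 수포자 카운트
--     first_cnt, second_cnt, third_cnt = 0, 0, 0
--
--     # 전체 문제 돌기
--     for i in range(len(answers)):
--         if first_lst[i % len(first_lst)] == answers[i]:
--             first_cnt += 1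
--         if second_lst[i % len(second_lst)] == answers[i]:
--             second_cnt += 1
--         if third_lst[i % len(third_lst)] == answers[i]:
--             third_cnt += 1
--
--     # 가장 많이 맞춘 사람을 기준으로 비교해서 선별
--     max_score = max(first_cnt, second_cnt, third_cnt)
--     if max_score == first_cnt:
--         answer.append(1)
--     if max_score == second_cnt:
--         answer.append(2)
--     if max_score == third_cnt:
--         answer.append(3)
--     return answer
-- ===== SOURCE B (Python) =====
-- def solution(answers):
--     patterns = [[1, 2, 3, 4, 5],
--                 [2, 1, 2, 3, 2, 4, 2, 5],
--                 [3, 3, 1, 1, 2, 2, 4, 4, 5, 5]]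
--
--     def score(p):
--         # walk answers once, consuming a cycling copy of the pattern
--         cur, s = [], 0
--         for a in answers:
--             if not cur:
--                 cur = list(p)
--             g = cur.pop(0)
--             if g == a:
--                 s += 1
--         return s
--
--     scores = [score(p) for p in patterns]
--     m = max(scores)
--     return [i + 1 for i, s in enumerate(scores) if s == m]
-- ===== Notes on version B (the rewrite author's own statement) =====
-- stated objective: alternative
-- what changed: A makes one combined indexed pass keeping three counters via i % len modular indexing; B scores each pattern with its own pass that consumes a cycling copy of the pattern (zip-with-cycle style, no index arithmetic), then picks the maximal scores by enumerate/filter.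
import Mathlib
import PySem

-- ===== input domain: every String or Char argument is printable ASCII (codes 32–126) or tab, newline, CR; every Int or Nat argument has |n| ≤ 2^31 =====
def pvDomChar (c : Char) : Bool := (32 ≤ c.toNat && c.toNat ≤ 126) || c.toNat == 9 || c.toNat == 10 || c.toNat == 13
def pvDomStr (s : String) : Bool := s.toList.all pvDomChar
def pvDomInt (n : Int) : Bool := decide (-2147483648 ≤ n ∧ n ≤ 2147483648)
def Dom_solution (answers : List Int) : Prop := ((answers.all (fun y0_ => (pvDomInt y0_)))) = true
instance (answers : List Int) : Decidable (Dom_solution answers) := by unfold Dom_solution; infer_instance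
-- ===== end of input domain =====

-- B replaces A's single modular-index pass with a per-pattern pass consuming a cycling
-- copy of the pattern (alternative decomposition; same asymptotic cost).

-- ===== PORT A =====
def solution (answers : List Int) : List Int :=
  let first : List Int := [1, 2, 3, 4, 5]
  let second : List Int := [2, 1, 2, 3, 2, 4, 2, 5]
  let third : List Int := [3, 3, 1, 1, 2, 2, 4, 4, 5, 5]
  -- indices are always in range, so pyGetD's default 0 is never used
  let c := (PySem.List.pyRange 0 (answers.length : Int) 1).foldl
    (fun (s : Int × Int × Int) i =>
      (if PySem.List.pyGetD first (PySem.Int.mod i (first.length : Int)) 0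
          = PySem.List.pyGetD answers i 0 then s.1 + 1 else s.1,
       if PySem.List.pyGetD second (PySem.Int.mod i (second.length : Int)) 0
          = PySem.List.pyGetD answers i 0 then s.2.1 + 1 else s.2.1,
       if PySem.List.pyGetD third (PySem.Int.mod i (third.length : Int)) 0
          = PySem.List.pyGetD answers i 0 then s.2.2 + 1 else s.2.2))
    ((0 : Int), (0 : Int), (0 : Int))
  let maxScore := max c.1 (max c.2.1 c.2.2)
  let answer : List Int := []
  let answer := if maxScore = c.1 then answer ++ [1] else answer
  let answer := if maxScore = c.2.1 then answer ++ [2] else answer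
  let answer := if maxScore = c.2.2 then answer ++ [3] else answer
  answer

-- ===== PORT B =====
-- one pass over `ans`, consuming a cycling copy `cur` of the pattern `orig`
def scoreCycle (orig cur ans : List Int) : Int :=
  match ans with
  | [] => 0
  | a :: rest =>
      let cur' := if cur.isEmpty then orig else cur
      (if cur'.headI = a then 1 else 0) + scoreCycle orig cur'.tail rest

def solution_alt (answers : List Int) : List Int :=
  let patterns : List (List Int) :=
    [[1, 2, 3, 4, 5], [2, 1, 2, 3, 2, 4, 2, 5], [3, 3, 1, 1, 2, 2, 4, 4, 5, 5]]
  let scores := patterns.map (fun p => scoreCycle p p answers)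
  -- scores has three elements, so max? is some and the default is never used
  let m := (PySem.List.max? scores (fun y => y)).getD 0
  (PySem.List.enumerate scores 0).filterMap
    (fun q => if q.2 = m then some (q.1 + 1) else none)

-- ===== PRECONDITION & SPEC =====
def Spec_solution (answers : List Int) (out : List Int) : Prop := out = solution_alt answers
instance (answers : List Int) (out : List Int) : Decidable (Spec_solution answers out) := by unfold Spec_solution; infer_instance

-- ===== CLAIM (what is proved, stated in full; the proofs are below) =====
def Claim_equal_solution : Prop := ∀ (answers : List Int), Dom_solution answers → Spec_solution answers (solution answers)

-- ===== LEMMAS AND PROOFS =====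

theorem foldl_triple (l : List Int) (P Q R : Int → Prop)
    [DecidablePred P] [DecidablePred Q] [DecidablePred R] (a b c : Int) :
    l.foldl (fun (s : Int × Int × Int) i =>
        (if P i then s.1 + 1 else s.1,
         if Q i then s.2.1 + 1 else s.2.1,
         if R i then s.2.2 + 1 else s.2.2)) (a, b, c)
      = (l.foldl (fun a i => if P i then a + 1 else a) a,
         l.foldl (fun b i => if Q i then b + 1 else b) b,
         l.foldl (fun c i => if R i then c + 1 else c) c) := by
  induction l generalizing a b c with
  | nil => rfl
  | cons x t ih => simp only [List.foldl_cons]; rw [ih]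

theorem scoreCycle_nil (p ans : List Int) : scoreCycle p [] ans = scoreCycle p p ans := by
  cases ans with
  | nil => rfl
  | cons a rest =>
    cases p <;> simp [scoreCycle]

theorem cnt_lemma (p xs : List Int) (hp : p ≠ []) :
    ∀ (d k : Nat), k + d = xs.length → ∀ c : Int,
      (PySem.List.pyRange (k : Int) (xs.length : Int) 1).foldl
        (fun c i => if PySem.List.pyGetD p (PySem.Int.mod i (p.length : Int)) 0
            = PySem.List.pyGetD xs i 0 then c + 1 else c) c
      = c + scoreCycle p (p.drop (k % p.length)) (xs.drop k) := by
  intro d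
  induction d with
  | zero =>
    intro k hk c
    rw [PySem.List.pyRange_one_eq_nil (by omega)]
    have : xs.drop k = [] := by
      apply List.drop_eq_nil_of_le; omega
    simp [this, scoreCycle]
  | succ d ih =>
    intro k hk c
    have hkl : k < xs.length := by omega
    have hL : 0 < p.length := List.length_pos_of_ne_nil hp
    rw [PySem.List.pyRange_one_cons (by exact_mod_cast hkl)]
    rw [List.foldl_cons]
    have hcast : ((k : Int) + 1) = ((k + 1 : Nat) : Int) := by push_cast; ring
    rw [hcast, ih (k + 1) (by omega)]
    -- rewrite the step at index k
    have hmod : PySem.Int.mod (k : Int) (p.length : Int) = ((k % p.length : Nat) : Int) :=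
      PySem.Int.mod_natCast k p.length
    have hmlt : k % p.length < p.length := Nat.mod_lt _ hL
    have hgp : PySem.List.pyGetD p ((k % p.length : Nat) : Int) 0 = p[k % p.length] := by
      rw [PySem.List.pyGetD_natCast]
      exact List.getD_eq_getElem p 0 hmlt
    have hgx : PySem.List.pyGetD xs (k : Int) 0 = xs[k] := by
      rw [PySem.List.pyGetD_natCast]
      exact List.getD_eq_getElem xs 0 hkl
    -- unfold one step of scoreCycle on the right
    have hdropx : xs.drop k = xs[k] :: xs.drop (k + 1) := List.drop_eq_getElem_cons hkl
    have hdropp : p.drop (k % p.length) = p[k % p.length] :: p.drop (k % p.length + 1) :=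
      List.drop_eq_getElem_cons hmlt
    have hstep : scoreCycle p (p.drop (k % p.length)) (xs.drop k)
        = (if p[k % p.length] = xs[k] then (1:Int) else 0)
          + scoreCycle p (p.drop ((k + 1) % p.length)) (xs.drop (k + 1)) := by
      rw [hdropx, hdropp]
      simp only [scoreCycle, List.isEmpty_cons, Bool.false_eq_true, if_false,
        List.headI_cons, List.tail_cons]
      congr 1
      by_cases hwrap : k % p.length + 1 = p.length
      · rw [hwrap, List.drop_length, scoreCycle_nil]
        have h0 : (k + 1) % p.length = 0 := by
          rcases Nat.lt_or_ge 1 p.length with h1 | h1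
          · rw [Nat.add_mod, Nat.mod_eq_of_lt h1, hwrap, Nat.mod_self]
          · have hL1 : p.length = 1 := by omega
            simp [hL1, Nat.mod_one]
        rw [h0, List.drop_zero]
      · have h1 : 1 < p.length := by
          rcases Nat.lt_or_ge 1 p.length with h1 | h1
          · exact h1
          · exfalso; have hL1 : p.length = 1 := by omega
            apply hwrap; rw [hL1]; omega
        have h0 : (k + 1) % p.length = k % p.length + 1 := by
          rw [Nat.add_mod, Nat.mod_eq_of_lt h1, Nat.mod_eq_of_lt (by omega : k % p.length + 1 < p.length)]
        rw [h0]
    rw [hstep, hmod, hgp, hgx]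
    by_cases hc : p[k % p.length] = xs[k] <;> simp [hc] <;> ring

-- ===== VERDICT (by name: the statement is the Claim_ definition above) =====
set_option maxHeartbeats 1000000 in
theorem solution_spec : Claim_equal_solution := by
  intro answers _
  unfold Spec_solution solution solution_alt
  simp only []
  rw [foldl_triple]
  have h1 := cnt_lemma [1,2,3,4,5] answers (by simp) answers.length 0 (by omega) 0
  have h2 := cnt_lemma [2,1,2,3,2,4,2,5] answers (by simp) answers.length 0 (by omega) 0
  have h3 := cnt_lemma [3,3,1,1,2,2,4,4,5,5] answers (by simp) answers.length 0 (by omega) 0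
  simp only [Nat.cast_zero, List.drop_zero, Nat.zero_mod, zero_add] at h1 h2 h3
  rw [h1, h2, h3]
  rw [List.map_cons, List.map_cons, List.map_cons, List.map_nil]
  rw [PySem.List.max?_id_cons]
  simp only [List.foldl_cons, List.foldl_nil, Option.getD_some]
  rw [PySem.List.enumerate_cons, PySem.List.enumerate_cons, PySem.List.enumerate_cons,
      PySem.List.enumerate_nil]
  simp only [List.filterMap_cons, List.filterMap_nil]
  generalize scoreCycle [1,2,3,4,5] [1,2,3,4,5] answers = s1
  generalize scoreCycle [2,1,2,3,2,4,2,5] [2,1,2,3,2,4,2,5] answers = s2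
  generalize scoreCycle [3,3,1,1,2,2,4,4,5,5] [3,3,1,1,2,2,4,4,5,5] answers = s3
  rw [← max_assoc]
  by_cases e1 : max (max s1 s2) s3 = s1 <;> by_cases e2 : max (max s1 s2) s3 = s2 <;>
    by_cases e3 : max (max s1 s2) s3 = s3 <;>
    simp [e1, e2, e3, eq_comm] <;> (try split_ifs) <;>
    first | rfl | omega | (exfalso; omega) | simp_all
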